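-- pv_equiv track=rewrite | github.com/MrBrantCode/unitest_baseline | mut_generate/mist_train_taco/taco_15077/solution.py | calculate_bulb_intensities
-- ===== SOURCE A (Python) =====
-- def calculate_bulb_intensities(N, K, A):
--     for _ in range(min(50, K)):
--         DP = [0] * (N + 1)
--         for j in range(N):
--             light = A[j]
--             DP[max(0, j - light)] += 1
--             DP[min(N, j + light + 1)] -= 1
--         for j in range(1, N):
--             DP[j] += DP[j - 1]
--         A = DP[:-1]
--     return A
-- ===== SOURCE B (Python) =====
-- def calculate_bulb_intensities(N, K, A):
--     for _ in range(min(50, K)):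
--         A = [sum(1 for j in range(N) if max(0, j - A[j]) <= p < min(N, j + A[j] + 1))
--              for p in range(N)]
--     return A
-- ===== Notes on version B (the rewrite author's own statement) =====
-- stated objective: alternative
-- what changed: Each relaxation step builds the new array by directly counting, for every position p, the bulbs whose clamped interval [max(0,j-A[j]), min(N,j+A[j]+1)) covers p, instead of accumulating a difference array and running an in-place prefix-sum pass.
-- outside the precondition, e.g. on calculate_bulb_intensities(1, 1, [-1]): A returns [-1], B returns [0]; on calculate_bulb_intensities(3, 1, [0, -5, 0]): A raises IndexError, B returns [1, 0, 1]
import Mathlib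
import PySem

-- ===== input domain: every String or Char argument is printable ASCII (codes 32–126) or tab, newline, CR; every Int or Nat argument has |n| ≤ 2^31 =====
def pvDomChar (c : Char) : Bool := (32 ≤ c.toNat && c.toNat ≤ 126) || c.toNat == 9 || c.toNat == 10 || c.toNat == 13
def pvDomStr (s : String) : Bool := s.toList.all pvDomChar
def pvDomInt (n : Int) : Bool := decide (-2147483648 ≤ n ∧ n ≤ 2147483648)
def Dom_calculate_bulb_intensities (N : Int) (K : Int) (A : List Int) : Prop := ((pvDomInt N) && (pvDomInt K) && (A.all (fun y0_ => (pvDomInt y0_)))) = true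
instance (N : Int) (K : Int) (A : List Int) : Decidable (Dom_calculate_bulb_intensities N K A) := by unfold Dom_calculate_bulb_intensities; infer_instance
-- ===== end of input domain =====

-- B rebuilds each relaxation step by directly counting covering intervals per position
-- (alternative decomposition) instead of A's difference-array + in-place prefix-sum pass.

-- ===== PORT A =====
-- one pass of A's outer loop body: difference array, prefix-sum pass, drop the sentinel cell
def pvIncA (N : Int) (A : List Int) (DP : List Int) (j : Int) : List Int :=
  let light := PySem.List.pyGetD A j 0
  let DP2 := PySem.List.pySetD DP (max 0 (j - light)) (PySem.List.pyGetD DP (max 0 (j - light)) 0 + 1)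
  PySem.List.pySetD DP2 (min N (j + light + 1)) (PySem.List.pyGetD DP2 (min N (j + light + 1)) 0 - 1)

def pvPrefA (DP : List Int) (j : Int) : List Int :=
  PySem.List.pySetD DP j (PySem.List.pyGetD DP j 0 + PySem.List.pyGetD DP (j - 1) 0)

def pvStepA (N : Int) (A : List Int) : List Int :=
  PySem.List.slice
    ((PySem.List.pyRange 1 N 1).foldl pvPrefA
      ((PySem.List.pyRange 0 N 1).foldl (pvIncA N A) (List.replicate (N + 1).toNat 0)))
    none (some (-1))

def calculate_bulb_intensities (N : Int) (K : Int) (A : List Int) : List Int :=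
  (PySem.List.pyRange 0 (min 50 K) 1).foldl (fun acc _ => pvStepA N acc) A

-- ===== PORT B =====
-- one pass of B's outer loop body: new[p] = number of bulbs whose clamped interval covers p
def pvPred (A : List Int) (N : Int) (p j : Int) : Bool :=
  let light := PySem.List.pyGetD A j 0
  decide (max 0 (j - light) ≤ p ∧ p < min N (j + light + 1))

def pvStepB (N : Int) (A : List Int) : List Int :=
  (PySem.List.pyRange 0 N 1).map
    (fun p => (((PySem.List.pyRange 0 N 1).countP (pvPred A N p) : Nat) : Int))

def calculate_bulb_intensities_alt (N : Int) (K : Int) (A : List Int) : List Int :=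
  (PySem.List.pyRange 0 (min 50 K) 1).foldl (fun acc _ => pvStepB N acc) A

-- ===== PRECONDITION & SPEC =====
-- Pre_ excludes inputs where the first iteration runs (K ≥ 1) and either N exceeds len(A)
-- (A raises IndexError) or some of the first N radii are negative (A then raises IndexError
-- or silently wraps a negative difference-array index, an artefact of A's implementation).
def Pre_calculate_bulb_intensities (N : Int) (K : Int) (A : List Int) : Prop :=
  K ≤ 0 ∨ (N ≤ (A.length : Int) ∧ ∀ x ∈ A.take N.toNat, 0 ≤ x)
instance (N : Int) (K : Int) (A : List Int) : Decidable (Pre_calculate_bulb_intensities N K A) := by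
  unfold Pre_calculate_bulb_intensities; infer_instance

def pvWitness_calculate_bulb_intensities : Int × Int × List Int := (3, 2, [0, 1, 0])

def Spec_calculate_bulb_intensities (N : Int) (K : Int) (A : List Int) (out : List Int) : Prop := out = calculate_bulb_intensities_alt N K A
instance (N : Int) (K : Int) (A : List Int) (out : List Int) : Decidable (Spec_calculate_bulb_intensities N K A out) := by unfold Spec_calculate_bulb_intensities; infer_instance

-- ===== CLAIM (what is proved, stated in full; the proofs are below) =====
def Claim_equal_calculate_bulb_intensities : Prop := ∀ (N : Int) (K : Int) (A : List Int), Dom_calculate_bulb_intensities N K A → Pre_calculate_bulb_intensities N K A → Spec_calculate_bulb_intensities N K A (calculate_bulb_intensities N K A)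

-- ===== LEMMAS AND PROOFS =====

-- sum of a point update
theorem pv_sum_set (l : List Int) (k : Nat) (v : Int) :
    (l.set k v).sum = l.sum + (if k < l.length then v - l.getD k 0 else 0) := by
  induction l generalizing k with
  | nil => simp
  | cons x xs ih =>
    cases k with
    | zero => simp [List.set]; ring
    | succ k => simp [List.set, ih k]; split_ifs <;> ring

-- sum of a prefix after a point update
theorem pv_sum_take_set (xs : List Int) (k : Nat) (v : Int) (m : Nat) (hk : k < xs.length) :
    ((xs.set k v).take m).sum
      = (xs.take m).sum + (if k < m then v - xs.getD k 0 else 0) := by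
  rw [List.take_set, pv_sum_set]
  have hlen : (xs.take m).length = min m xs.length := List.length_take ..
  by_cases h : k < m
  · have h1 : k < (xs.take m).length := by omega
    have h2 : (xs.take m).getD k 0 = xs.getD k 0 := by
      rw [List.getD_eq_getElem _ _ h1, List.getD_eq_getElem _ _ hk]
      simp [List.getElem_take]
    rw [if_pos h1, if_pos h, h2]
  · have h1 : ¬ k < (xs.take m).length := by omega
    rw [if_neg h1, if_neg h]

theorem pv_sum_take_succ (xs : List Int) (k : Nat) (hk : k < xs.length) :
    (xs.take (k + 1)).sum = (xs.take k).sum + xs.getD k 0 := by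
  rw [List.take_succ]
  simp [List.getD_eq_getElem _ _ hk, hk]

theorem pv_getD_set_ne (l : List Int) (i j : Nat) (v : Int) (h : i ≠ j) :
    (l.set i v).getD j 0 = l.getD j 0 := by
  simp [List.getD, List.getElem?_set_ne h]

theorem pv_getD_set_self (l : List Int) (i : Nat) (v : Int) (h : i < l.length) :
    (l.set i v).getD i 0 = v := by
  simp [List.getD, List.getElem?_set_self, h]

theorem pv_len_incA (N : Int) (A DP : List Int) (j : Int) :
    (pvIncA N A DP j).length = DP.length := by
  simp [pvIncA, PySem.List.length_pySetD]

theorem pv_len_incA_fold (N : Int) (A : List Int) (js : List Int) :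
    ∀ DP : List Int, (js.foldl (pvIncA N A) DP).length = DP.length := by
  induction js with
  | nil => intro DP; rfl
  | cons j js ih => intro DP; rw [List.foldl_cons, ih, pv_len_incA]

theorem pv_len_pref (DP : List Int) (j : Int) : (pvPrefA DP j).length = DP.length := by
  simp [pvPrefA, PySem.List.length_pySetD]

theorem pv_len_pref_fold (js : List Int) :
    ∀ DP : List Int, (js.foldl pvPrefA DP).length = DP.length := by
  induction js with
  | nil => intro DP; rfl
  | cons j js ih => intro DP; rw [List.foldl_cons, ih, pv_len_pref]

-- prefix-sum effect of the +1/-1 pair of point updates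
theorem pv_set2_sum (DP : List Int) (a b : Int) (n p : Nat) (hlen : DP.length = n + 1)
    (ha0 : 0 ≤ a) (hab : a < b) (hbn : b ≤ (n : Int)) (hp : p < n) :
    ((PySem.List.pySetD (PySem.List.pySetD DP a (PySem.List.pyGetD DP a 0 + 1)) b
        (PySem.List.pyGetD (PySem.List.pySetD DP a (PySem.List.pyGetD DP a 0 + 1)) b 0 - 1)).take
        (p + 1)).sum
      = (DP.take (p + 1)).sum + (if a ≤ (p : Int) ∧ (p : Int) < b then 1 else 0) := by
  have hb0 : (0 : Int) ≤ b := by omega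
  have haNat : a.toNat < DP.length := by omega
  have hbNat : b.toNat < DP.length := by omega
  rw [PySem.List.pySetD_of_nonneg _ _ ha0, PySem.List.pySetD_of_nonneg _ _ hb0]
  have hga : PySem.List.pyGetD DP a 0 = DP.getD a.toNat 0 := by
    rw [PySem.List.pyGetD_eq_getElem _ _ ha0 (by omega), List.getD_eq_getElem _ _ haNat]
  rw [hga]
  have hlen2 : (DP.set a.toNat (DP.getD a.toNat 0 + 1)).length = DP.length := List.length_set ..
  have hgb : PySem.List.pyGetD (DP.set a.toNat (DP.getD a.toNat 0 + 1)) b 0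
      = (DP.set a.toNat (DP.getD a.toNat 0 + 1)).getD b.toNat 0 := by
    rw [PySem.List.pyGetD_eq_getElem _ _ hb0 (by omega)]
    exact (List.getD_eq_getElem _ _ (by omega)).symm
  rw [hgb]
  rw [pv_sum_take_set _ _ _ _ (by omega), pv_sum_take_set _ _ _ _ haNat]
  have h1 : a.toNat < p + 1 ↔ a ≤ (p : Int) := by omega
  have h2 : b.toNat < p + 1 ↔ b ≤ (p : Int) := by omega
  split_ifs with c1 c2 c3 c2 c3 <;> omega

-- one difference-array update shifts the prefix sum by the covering indicator
theorem pv_incA_sum (N : Int) (A DP : List Int) (n : Nat) (j : Int) (p : Nat)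
    (hN : N = (n : Int)) (hlen : DP.length = n + 1) (hj0 : 0 ≤ j) (hjN : j < N)
    (hlight : 0 ≤ PySem.List.pyGetD A j 0) (hp : p < n) :
    ((pvIncA N A DP j).take (p + 1)).sum
      = (DP.take (p + 1)).sum + (if pvPred A N (p : Int) j then 1 else 0) := by
  have := pv_set2_sum DP (max 0 (j - PySem.List.pyGetD A j 0))
    (min N (j + PySem.List.pyGetD A j 0 + 1)) n p hlen (le_max_left 0 _)
    (by omega) (by omega) hp
  simpa [pvIncA, pvPred] using this


-- folding all updates accumulates the count of covering bulbs
theorem pv_incA_fold_sum (N : Int) (A : List Int) (n : Nat) (hN : N = (n : Int))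
    (hA : ∀ j : Int, 0 ≤ j → j < N → 0 ≤ PySem.List.pyGetD A j 0) :
    ∀ (js : List Int) (DP : List Int), (∀ j ∈ js, 0 ≤ j ∧ j < N) → DP.length = n + 1 →
      ∀ p : Nat, p < n →
        ((js.foldl (pvIncA N A) DP).take (p + 1)).sum
          = (DP.take (p + 1)).sum + ((js.countP (pvPred A N (p : Int)) : Nat) : Int) := by
  intro js
  induction js with
  | nil => intro DP _ _ p _; simp
  | cons j js ih =>
    intro DP hmem hlen p hp
    have hj := hmem j (List.mem_cons_self ..)
    rw [List.foldl_cons, ih _ (fun x hx => hmem x (List.mem_cons_of_mem _ hx))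
        (by rw [pv_len_incA]; exact hlen) p hp]
    rw [pv_incA_sum N A DP n j p hN hlen hj.1 hj.2 (hA j hj.1 hj.2) hp]
    rw [List.countP_cons]
    push_cast
    split_ifs <;> simp_all <;> ring

-- the in-place pass from position m onward turns entries into prefix sums
theorem pv_pref_fold (n : Nat) (N : Int) (hN : N = (n : Int)) :
    ∀ (fuel m : Nat) (D : List Int), 1 ≤ m → m + fuel = n → D.length = n + 1 →
      ∀ p : Nat, p < n →
        ((PySem.List.pyRange (m : Int) N 1).foldl pvPrefA D).getD p 0
          = if p < m then D.getD p 0 else (D.take (p + 1)).sum - (D.take (m - 1)).sum := by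
  intro fuel
  induction fuel with
  | zero =>
    intro m D hm1 hmn hlen p hp
    have : PySem.List.pyRange (m : Int) N 1 = [] := by
      rw [PySem.List.pyRange_one]
      have : (N - (m : Int)).toNat = 0 := by omega
      rw [this]; rfl
    rw [this, List.foldl_nil, if_pos (by omega)]
  | succ fuel ih =>
    intro m D hm1 hmn hlen p hp
    have hmN : (m : Int) < N := by omega
    rw [PySem.List.pyRange_one_cons hmN, List.foldl_cons]
    have hmlt : m < D.length := by omega
    have hm1lt : m - 1 < D.length := by omega
    have hstep : pvPrefA D (m : Int) = D.set m (D.getD m 0 + D.getD (m - 1) 0) := by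
      unfold pvPrefA
      rw [PySem.List.pySetD_of_nonneg _ _ (by omega)]
      rw [PySem.List.pyGetD_eq_getElem _ _ (by omega) (by omega),
          PySem.List.pyGetD_eq_getElem _ _ (by omega) (by omega)]
      rw [List.getD_eq_getElem _ _ hmlt, List.getD_eq_getElem _ _ hm1lt]
      have e2 : ((m : Int) - 1).toNat = m - 1 := by omega
      simp only [Int.toNat_natCast, e2]
    have hcast : (m : Int) + 1 = ((m + 1 : Nat) : Int) := by push_cast; ring
    rw [hstep, hcast]
    set D1 := D.set m (D.getD m 0 + D.getD (m - 1) 0) with hD1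
    have hlen1 : D1.length = n + 1 := by rw [hD1, List.length_set]; exact hlen
    rw [ih (m + 1) D1 (by omega) (by omega) hlen1 p hp]
    simp only [Nat.add_sub_cancel]
    have hsetlen : (D.set m (D.getD m 0 + D.getD (m - 1) 0)).length = D.length :=
      List.length_set ..
    by_cases hpm : p < m
    · rw [if_pos (by omega), if_pos hpm, hD1, pv_getD_set_ne _ _ _ _ (by omega)]
    · by_cases hpe : p = m
      · subst hpe
        rw [if_pos (by omega), if_neg (by omega), hD1, pv_getD_set_self _ _ _ (by omega)]
        rw [pv_sum_take_succ _ _ (by omega)]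
        rcases Nat.exists_eq_add_of_le hm1 with ⟨k, hk⟩
        have h2 : p - 1 + 1 = p := by omega
        have := pv_sum_take_succ D (p - 1) (by omega)
        rw [h2] at this
        rw [this]
        ring
      · rw [if_neg (by omega), if_neg hpm, hD1]
        rw [pv_sum_take_set _ _ _ _ hmlt, pv_sum_take_set _ _ _ _ hmlt]
        rw [if_pos (by omega), if_neg (by omega)]
        have hsm : (D.take m).sum = (D.take (m - 1)).sum + D.getD (m - 1) 0 := by
          have := pv_sum_take_succ D (m - 1) hm1lt
          have h2 : m - 1 + 1 = m := by omega
          rw [h2] at this; exact this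
        rw [hsm]; ring

-- one relaxation step: difference array + prefix pass = direct covering count
theorem pv_step_eq (N : Int) (A : List Int) (h1 : N ≤ (A.length : Int))
    (h2 : ∀ x ∈ A.take N.toNat, 0 ≤ x) : pvStepA N A = pvStepB N A := by
  by_cases hN : N ≤ 0
  · have hr0 : PySem.List.pyRange 0 N 1 = [] := by
      rw [PySem.List.pyRange_one]
      have : (N - 0).toNat = 0 := by omega
      rw [this]; rfl
    have hr1 : PySem.List.pyRange 1 N 1 = [] := by
      rw [PySem.List.pyRange_one]
      have : (N - 1).toNat = 0 := by omega
      rw [this]; rfl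
    unfold pvStepA pvStepB
    rw [hr0, hr1]
    simp only [List.foldl_nil, List.map_nil, PySem.List.slice_to_neg_one]
    have : (N + 1).toNat = 0 ∨ (N + 1).toNat = 1 := by omega
    rcases this with h | h <;> rw [h] <;> rfl
  · push_neg at hN
    set n := N.toNat with hn
    have hNn : N = (n : Int) := by omega
    have hA : ∀ j : Int, 0 ≤ j → j < N → 0 ≤ PySem.List.pyGetD A j 0 := by
      intro j hj0 hjN
      rw [PySem.List.pyGetD_eq_getElem _ _ hj0 (by omega)]
      have hjn : j.toNat < n := by omega
      have hjl : j.toNat < A.length := by omega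
      have : A[j.toNat] ∈ A.take n := by
        have hlt : j.toNat < (A.take n).length := by
          rw [List.length_take]; omega
        have : (A.take n)[j.toNat] = A[j.toNat] := List.getElem_take ..
        rw [← this]; exact List.getElem_mem hlt
      exact h2 _ this
    unfold pvStepA pvStepB
    set DP0 : List Int := List.replicate (N + 1).toNat 0 with hDP0
    have hlen0 : DP0.length = n + 1 := by
      rw [hDP0, List.length_replicate]; omega
    set DP1 := (PySem.List.pyRange 0 N 1).foldl (pvIncA N A) DP0 with hDP1
    have hlen1 : DP1.length = n + 1 := by rw [hDP1, pv_len_incA_fold]; exact hlen0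
    set DP2 := (PySem.List.pyRange 1 N 1).foldl pvPrefA DP1 with hDP2
    have hlen2 : DP2.length = n + 1 := by rw [hDP2, pv_len_pref_fold]; exact hlen1
    rw [PySem.List.slice_to_neg_one]
    apply List.ext_getElem
    · rw [List.length_dropLast, hlen2, List.length_map, PySem.List.length_pyRange_one]
      omega
    · intro p hpl hpr
      have hp : p < n := by rw [List.length_dropLast, hlen2] at hpl; omega
      have hDP2p : DP2[p]'(by omega) = DP2.getD p 0 := (List.getD_eq_getElem _ _ (by omega)).symm
      rw [List.getElem_dropLast, hDP2p, hDP2]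
      have hone : ((1 : Nat) : Int) = (1 : Int) := rfl
      have := pv_pref_fold n N hNn (n - 1) 1 DP1 (by omega) (by omega) hlen1 p hp
      rw [hone] at this
      rw [this]
      have hsum1 : (DP1.take (p + 1)).sum
          = ((PySem.List.pyRange 0 N 1).countP (pvPred A N (p : Int)) : Int) := by
        have := pv_incA_fold_sum N A n hNn hA (PySem.List.pyRange 0 N 1) DP0
          (fun j hj => by
            rw [PySem.List.mem_pyRange_one] at hj; exact hj) hlen0 p hp
        rw [← hDP1] at this
        rw [this, hDP0]
        simp [List.take_replicate]
      have hB : ((PySem.List.pyRange 0 N 1).map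
            (fun q => (((PySem.List.pyRange 0 N 1).countP (pvPred A N q) : Nat) : Int)))[p]'hpr
          = ((PySem.List.pyRange 0 N 1).countP (pvPred A N (p : Int)) : Int) := by
        rw [List.getElem_map, PySem.List.getElem_pyRange_one]
        norm_num
      rw [hB]
      by_cases hp1 : p < 1
      · have hp0 : p = 0 := by omega
        subst hp0
        rw [if_pos (by omega)]
        have := pv_sum_take_succ DP1 0 (by omega)
        simp at this
        rw [← hsum1, this]
        simp [List.getD]
      · rw [if_neg hp1]
        simp only [Nat.sub_self, List.take_zero, List.sum_nil, sub_zero]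
        exact hsum1

-- B's step always yields a valid next state: length ≥ N and nonnegative entries
theorem pv_stepB_inv (N : Int) (A : List Int) :
    N ≤ ((pvStepB N A).length : Int) ∧ ∀ x ∈ (pvStepB N A).take N.toNat, 0 ≤ x := by
  constructor
  · unfold pvStepB
    rw [List.length_map, PySem.List.length_pyRange_one]
    omega
  · intro x hx
    have hx' := List.mem_of_mem_take hx
    unfold pvStepB at hx'
    rw [List.mem_map] at hx'
    obtain ⟨q, _, hq⟩ := hx'
    rw [← hq]
    exact Int.natCast_nonneg _

theorem pv_fold_eq (N : Int) (L : List Int) :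
    ∀ A : List Int, N ≤ (A.length : Int) → (∀ x ∈ A.take N.toNat, 0 ≤ x) →
      L.foldl (fun acc _ => pvStepA N acc) A = L.foldl (fun acc _ => pvStepB N acc) A := by
  induction L with
  | nil => intro A _ _; rfl
  | cons c L ih =>
    intro A h1 h2
    rw [List.foldl_cons, List.foldl_cons, pv_step_eq N A h1 h2]
    exact ih _ (pv_stepB_inv N A).1 (pv_stepB_inv N A).2

-- ===== VERDICT (by name: the statement is the Claim_ definition above) =====
theorem calculate_bulb_intensities_spec : Claim_equal_calculate_bulb_intensities := by
  intro N K A _ hPre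
  unfold Spec_calculate_bulb_intensities calculate_bulb_intensities calculate_bulb_intensities_alt
  rcases hPre with hK | ⟨h1, h2⟩
  · have : PySem.List.pyRange 0 (min 50 K) 1 = [] := by
      rw [PySem.List.pyRange_one]
      have : (min 50 K - 0).toNat = 0 := by omega
      rw [this]; rfl
    rw [this]; rfl
  · exact pv_fold_eq N _ A h1 h2
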